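-- pv_equiv track=rewrite | github.com/SwayamMehta10/Clickless-AI | src/runtime/demo.py | _infer_allergens
-- ===== SOURCE A (Python) =====
-- from typing import Dict, List, Optional, Tuple
--
-- def _infer_allergens(product_name: str) -> List[str]:
--     lowered = (product_name or "").lower()
--     allergens = []
--     if any(token in lowered for token in ["milk", "yogurt", "cheese", "butter"]):
--         allergens.append("milk")
--     if "egg" in lowered:
--         allergens.append("eggs")
--     if any(token in lowered for token in ["bread", "wheat", "pasta"]):
--         allergens.append("gluten")
--     if "peanut" in lowered:
--         allergens.append("peanuts")
--     return allergens
-- ===== SOURCE B (Python) =====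
-- PATTERNS = [
--     ("milk", "milk"), ("yogurt", "milk"), ("cheese", "milk"), ("butter", "milk"),
--     ("egg", "eggs"),
--     ("bread", "gluten"), ("wheat", "gluten"), ("pasta", "gluten"),
--     ("peanut", "peanuts"),
-- ]
-- ORDER = ["milk", "eggs", "gluten", "peanuts"]
--
-- def _infer_allergens(product_name):
--     lowered = (product_name or "").lower()
--     found = set()
--     for i in range(len(lowered)):
--         for token, label in PATTERNS:
--             if lowered.startswith(token, i):
--                 found.add(label)
--     return [label for label in ORDER if label in found]
-- ===== Notes on version B (the rewrite author's own statement) =====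
-- stated objective: alternative
-- what changed: Instead of four per-label substring-membership branches, B scans the lowered string position by position as a naive multi-pattern matcher (checking every trigger token as a prefix at each index), accumulates hit labels in a set, and finally emits the canonical label order filtered by that set.
import Mathlib
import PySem

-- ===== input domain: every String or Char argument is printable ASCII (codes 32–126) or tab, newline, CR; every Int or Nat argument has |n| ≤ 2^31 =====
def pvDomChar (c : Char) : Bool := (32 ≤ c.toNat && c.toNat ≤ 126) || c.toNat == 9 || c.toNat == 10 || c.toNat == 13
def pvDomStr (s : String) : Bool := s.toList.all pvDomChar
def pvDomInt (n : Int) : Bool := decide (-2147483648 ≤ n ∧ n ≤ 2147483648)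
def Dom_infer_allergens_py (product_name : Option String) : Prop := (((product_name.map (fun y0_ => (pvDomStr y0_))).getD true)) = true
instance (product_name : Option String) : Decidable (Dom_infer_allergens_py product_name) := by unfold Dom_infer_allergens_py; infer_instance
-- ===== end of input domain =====

-- B replaces A's four per-label substring checks with a position-by-position multi-pattern
-- scan that accumulates hit labels in a set and emits them in canonical order (alternative; same cost).

-- ===== PORT A =====
def infer_allergens_py (product_name : Option String) : List String :=
  let lowered := PySem.Str.lower (product_name.getD "")   -- `(product_name or "").lower()`: None → ""
  let allergens : List String := []
  let allergens := if (["milk", "yogurt", "cheese", "butter"].any fun token => PySem.Str.isIn token lowered)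
                   then allergens ++ ["milk"] else allergens
  let allergens := if PySem.Str.isIn "egg" lowered then allergens ++ ["eggs"] else allergens
  let allergens := if (["bread", "wheat", "pasta"].any fun token => PySem.Str.isIn token lowered)
                   then allergens ++ ["gluten"] else allergens
  let allergens := if PySem.Str.isIn "peanut" lowered then allergens ++ ["peanuts"] else allergens
  allergens

-- ===== PORT B =====
def pvPatterns : List (String × String) :=
  [("milk", "milk"), ("yogurt", "milk"), ("cheese", "milk"), ("butter", "milk"),
   ("egg", "eggs"),
   ("bread", "gluten"), ("wheat", "gluten"), ("pasta", "gluten"),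
   ("peanut", "peanuts")]

def pvOrder : List String := ["milk", "eggs", "gluten", "peanuts"]

-- one position i of the scan: try every (token, label) pattern at index i
-- `lowered.startswith(token, i)` for 0 ≤ i is ported by hand as "token is a prefix of drop i" (exact there).
def pvScanStep (cs : List Char) (acc : PySem.Set String) (i : Int) : PySem.Set String :=
  pvPatterns.foldl
    (fun a p => if p.1.toList.isPrefixOf (cs.drop i.toNat) then PySem.Set.add a p.2 else a) acc

def infer_allergens_py_alt (product_name : Option String) : List String :=
  let lowered := PySem.Str.lower (product_name.getD "")
  let cs := lowered.toList
  let found := (PySem.List.pyRange 0 cs.length 1).foldl (pvScanStep cs) PySem.Set.empty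
  pvOrder.filter (fun label => PySem.Set.contains found label)

-- ===== PRECONDITION & SPEC =====
def Spec_infer_allergens_py (product_name : Option String) (out : List String) : Prop := out = infer_allergens_py_alt product_name
instance (product_name : Option String) (out : List String) : Decidable (Spec_infer_allergens_py product_name out) := by unfold Spec_infer_allergens_py; infer_instance

-- ===== CLAIM (what is proved, stated in full; the proofs are below) =====
def Claim_equal_infer_allergens_py : Prop := ∀ (product_name : Option String), Dom_infer_allergens_py product_name → Spec_infer_allergens_py product_name (infer_allergens_py product_name)

-- ===== LEMMAS AND PROOFS =====

-- membership through the inner pattern fold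
theorem pv_mem_patFold (ps : List (String × String)) (d : List Char) (acc : PySem.Set String)
    (x : String) :
    x ∈ ps.foldl (fun a p => if p.1.toList.isPrefixOf d then PySem.Set.add a p.2 else a) acc ↔
      x ∈ acc ∨ ∃ p ∈ ps, p.1.toList.isPrefixOf d = true ∧ x = p.2 := by
  induction ps generalizing acc with
  | nil => simp
  | cons p ps ih =>
    simp only [List.foldl_cons]
    by_cases h : p.1.toList.isPrefixOf d = true
    · rw [if_pos h, ih]
      simp only [PySem.Set.mem_add]
      constructor
      · rintro ((hm | rfl) | ⟨q, hq, hpre, hx⟩)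
        · exact .inl hm
        · exact .inr ⟨p, List.mem_cons_self, h, rfl⟩
        · exact .inr ⟨q, List.mem_cons_of_mem _ hq, hpre, hx⟩
      · rintro (hm | ⟨q, hq, hpre, hx⟩)
        · exact .inl (.inl hm)
        · rcases List.mem_cons.mp hq with rfl | hq
          · exact .inl (.inr hx)
          · exact .inr ⟨q, hq, hpre, hx⟩
    · rw [if_neg h, ih]
      constructor
      · rintro (hm | ⟨q, hq, hpre, hx⟩)
        · exact .inl hm
        · exact .inr ⟨q, List.mem_cons_of_mem _ hq, hpre, hx⟩
      · rintro (hm | ⟨q, hq, hpre, hx⟩)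
        · exact .inl hm
        · rcases List.mem_cons.mp hq with rfl | hq
          · exact absurd hpre h
          · exact .inr ⟨q, hq, hpre, hx⟩

-- membership through the position fold
theorem pv_mem_found (l : List Int) (cs : List Char) (s : PySem.Set String) (x : String) :
    x ∈ l.foldl (pvScanStep cs) s ↔
      x ∈ s ∨ ∃ i ∈ l, ∃ p ∈ pvPatterns, p.1.toList.isPrefixOf (cs.drop i.toNat) = true ∧ x = p.2 := by
  induction l generalizing s with
  | nil => simp
  | cons i l ih =>
    simp only [List.foldl_cons]
    rw [ih, pvScanStep, pv_mem_patFold]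
    simp only [List.mem_cons]
    constructor
    · rintro (⟨h | ⟨p, hp, hpre, hx⟩⟩ | ⟨j, hj, hrest⟩)
      · exact .inl h
      · exact .inr ⟨i, .inl rfl, p, hp, hpre, hx⟩
      · exact .inr ⟨j, .inr hj, hrest⟩
    · rintro (h | ⟨j, (rfl | hj), hrest⟩)
      · exact .inl (.inl h)
      · exact .inl (.inr hrest)
      · exact .inr ⟨j, hj, hrest⟩

-- a nonempty token is a prefix at some scanned position iff it is a substring
theorem pv_exists_pos_iff_isIn (t cs : List Char) (ht : t ≠ []) :
    (∃ i ∈ PySem.List.pyRange 0 cs.length 1, t.isPrefixOf (cs.drop i.toNat) = true) ↔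
      PySem.Chars.isIn t cs = true := by
  rw [← PySem.Chars.exists_prefix_drop_iff_isIn]
  constructor
  · rintro ⟨i, _, hpre⟩
    exact ⟨i.toNat, (List.isPrefixOf_iff_prefix.mp hpre)⟩
  · rintro ⟨j, hpre⟩
    have hj : j < cs.length := by
      by_contra hge
      rw [List.drop_eq_nil_of_le (by omega)] at hpre
      exact ht (List.prefix_nil.mp hpre)
    refine ⟨(j : Int), ?_, ?_⟩
    · rw [PySem.List.mem_pyRange_one]; omega
    · simpa [List.isPrefixOf_iff_prefix] using hpre

-- the found set, characterised by substring membership per pattern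
theorem pv_contains_found (cs : List Char) (x : String) :
    x ∈ (PySem.List.pyRange 0 cs.length 1).foldl (pvScanStep cs) PySem.Set.empty ↔
      ∃ p ∈ pvPatterns, x = p.2 ∧ PySem.Chars.isIn p.1.toList cs = true := by
  rw [pv_mem_found]
  have hne : ∀ p ∈ pvPatterns, p.1.toList ≠ [] := by decide
  constructor
  · rintro (h | ⟨i, hi, p, hp, hpre, hx⟩)
    · simp [PySem.Set.empty] at h
    · exact ⟨p, hp, hx, (pv_exists_pos_iff_isIn _ _ (hne p hp)).mp ⟨i, hi, hpre⟩⟩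
  · rintro ⟨p, hp, hx, hin⟩
    obtain ⟨i, hi, hpre⟩ := (pv_exists_pos_iff_isIn _ _ (hne p hp)).mpr hin
    exact .inr ⟨i, hi, p, hp, hpre, hx⟩

-- ===== VERDICT (by name: the statement is the Claim_ definition above) =====
set_option maxHeartbeats 1000000 in
theorem infer_allergens_py_spec : Claim_equal_infer_allergens_py := by
  intro pn _
  unfold Spec_infer_allergens_py infer_allergens_py infer_allergens_py_alt
  simp only [pvOrder, List.filter_cons, List.filter_nil, PySem.Str.isIn_eq]
  set cs := (PySem.Str.lower (pn.getD "")).toList with hcs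
  have hc : ∀ x, PySem.Set.contains
      ((PySem.List.pyRange 0 cs.length 1).foldl (pvScanStep cs) PySem.Set.empty) x = true ↔
      ∃ p ∈ pvPatterns, x = p.2 ∧ PySem.Chars.isIn p.1.toList cs = true := by
    intro x; rw [PySem.Set.contains_iff, pv_contains_found]
  have hmilk : PySem.Set.contains
      ((PySem.List.pyRange 0 cs.length 1).foldl (pvScanStep cs) PySem.Set.empty) "milk" =
      (["milk", "yogurt", "cheese", "butter"].any fun t => PySem.Chars.isIn t.toList cs) := by
    rw [Bool.eq_iff_iff, hc]; simp [pvPatterns]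
  have heggs : PySem.Set.contains
      ((PySem.List.pyRange 0 cs.length 1).foldl (pvScanStep cs) PySem.Set.empty) "eggs" =
      PySem.Chars.isIn "egg".toList cs := by
    rw [Bool.eq_iff_iff, hc]; simp [pvPatterns]
  have hglut : PySem.Set.contains
      ((PySem.List.pyRange 0 cs.length 1).foldl (pvScanStep cs) PySem.Set.empty) "gluten" =
      (["bread", "wheat", "pasta"].any fun t => PySem.Chars.isIn t.toList cs) := by
    rw [Bool.eq_iff_iff, hc]; simp [pvPatterns]
  have hpean : PySem.Set.contains
      ((PySem.List.pyRange 0 cs.length 1).foldl (pvScanStep cs) PySem.Set.empty) "peanuts" =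
      PySem.Chars.isIn "peanut".toList cs := by
    rw [Bool.eq_iff_iff, hc]; simp [pvPatterns]
  rw [hmilk, heggs, hglut, hpean]
  split_ifs <;> rfl
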